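-- pv_equiv track=rewrite | github.com/karthik789338/scholargraph | src/data/build_queries.py | choose_best_chunk_for_sentences
-- ===== SOURCE A (Python) =====
-- from typing import Any, Dict, Iterable, List, Optional, Sequence, Tuple
--
-- def choose_best_chunk_for_sentences(
--     sentence_ids: Sequence[str],
--     sentence_to_chunk_ids: Dict[str, List[str]],
-- ) -> Optional[str]:
--     """
--     Choose the chunk that covers the most gold evidence sentences.
--     Useful for SciFact where one rationale may span multiple sentences.
--     """
--     votes: Dict[str, int] = {}
--
--     for sent_id in sentence_ids:
--         for chunk_id in sentence_to_chunk_ids.get(sent_id, []):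
--             votes[chunk_id] = votes.get(chunk_id, 0) + 1
--
--     if not votes:
--         return None
--
--     # Highest coverage, then stable lexical order
--     best_chunk_id = sorted(votes.items(), key=lambda x: (-x[1], x[0]))[0][0]
--     return best_chunk_id
-- ===== SOURCE B (Python) =====
-- from typing import Dict, List, Optional, Sequence
--
--
-- def choose_best_chunk_for_sentences(
--     sentence_ids: Sequence[str],
--     sentence_to_chunk_ids: Dict[str, List[str]],
-- ) -> Optional[str]:
--     # Flatten all voted chunk ids, count them, then pick the winner in a
--     # single linear scan (highest count, then lexicographically smallest id)
--     # instead of sorting all items and taking the first.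
--     all_chunks = [c for s in sentence_ids for c in sentence_to_chunk_ids.get(s, [])]
--     votes: Dict[str, int] = {}
--     for c in all_chunks:
--         votes[c] = votes.get(c, 0) + 1
--     best = None  # (chunk_id, count)
--     for cid, n in votes.items():
--         if best is None or n > best[1] or (n == best[1] and cid < best[0]):
--             best = (cid, n)
--     return None if best is None else best[0]
-- ===== Notes on version B (the rewrite author's own statement) =====
-- stated objective: simpler
-- what changed: Replaces sort-all-items-then-take-index-0 with a single linear best-so-far scan over the vote counts (and counts over one flattened list instead of nested loops), preserving the highest-count-then-smallest-id tie-break.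
import Mathlib
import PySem

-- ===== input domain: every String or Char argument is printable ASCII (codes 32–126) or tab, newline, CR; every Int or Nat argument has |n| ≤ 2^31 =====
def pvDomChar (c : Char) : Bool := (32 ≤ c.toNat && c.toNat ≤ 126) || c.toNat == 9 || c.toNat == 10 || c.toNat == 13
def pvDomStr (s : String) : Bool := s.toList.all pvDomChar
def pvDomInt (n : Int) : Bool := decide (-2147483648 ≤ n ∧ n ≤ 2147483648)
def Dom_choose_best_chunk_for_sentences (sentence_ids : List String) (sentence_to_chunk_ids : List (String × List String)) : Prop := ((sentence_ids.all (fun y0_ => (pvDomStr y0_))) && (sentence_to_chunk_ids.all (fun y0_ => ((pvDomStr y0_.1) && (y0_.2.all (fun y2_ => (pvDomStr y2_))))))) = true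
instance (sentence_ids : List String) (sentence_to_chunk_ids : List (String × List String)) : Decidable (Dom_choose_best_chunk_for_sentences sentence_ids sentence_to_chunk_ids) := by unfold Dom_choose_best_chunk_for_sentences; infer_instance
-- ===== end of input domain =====

-- B replaces A's sort-all-vote-items-then-take-first selection with a single linear
-- best-so-far scan (same highest-count-then-smallest-id tie-break), for simplicity; not claimed faster.

-- ===== PORT A =====
-- Port of A: nested counting loop into a dict, then sorted(items, key=(-count, id))[0][0].
def choose_best_chunk_for_sentences (sentence_ids : List String) (sentence_to_chunk_ids : List (String × List String)) : Option String :=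
  let votes : PySem.Dict String Int :=
    sentence_ids.foldl (fun d sent_id =>
      ((PySem.Dict.ofList sentence_to_chunk_ids).getD sent_id []).foldl
        (fun d chunk_id => d.insert chunk_id (d.getD chunk_id 0 + 1)) d)
      PySem.Dict.empty
  if votes.items = [] then none
  else some (PySem.List.pyGetD (PySem.List.sorted2 votes.items (fun x => -x.2) (fun x => x.1)) 0 ("", 0)).1

-- ===== PORT B =====
-- Port of B: flatten voted chunk ids, count them in one loop, then a linear best-so-far scan.
def choose_best_chunk_for_sentences_alt (sentence_ids : List String) (sentence_to_chunk_ids : List (String × List String)) : Option String :=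
  let all_chunks : List String :=
    sentence_ids.flatMap (fun s => (PySem.Dict.ofList sentence_to_chunk_ids).getD s [])
  let votes : PySem.Dict String Int :=
    all_chunks.foldl (fun d c => d.insert c (d.getD c 0 + 1)) PySem.Dict.empty
  (votes.items.foldl (fun best p =>
      match best with
      | none => some p
      | some q => if p.2 > q.2 || (p.2 == q.2 && p.1 < q.1) then some p else some q)
    none).map Prod.fst

-- ===== PRECONDITION & SPEC =====
def Spec_choose_best_chunk_for_sentences (sentence_ids : List String) (sentence_to_chunk_ids : List (String × List String)) (out : Option String) : Prop := out = choose_best_chunk_for_sentences_alt sentence_ids sentence_to_chunk_ids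
instance (sentence_ids : List String) (sentence_to_chunk_ids : List (String × List String)) (out : Option String) : Decidable (Spec_choose_best_chunk_for_sentences sentence_ids sentence_to_chunk_ids out) := by unfold Spec_choose_best_chunk_for_sentences; infer_instance

-- ===== CLAIM (what is proved, stated in full; the proofs are below) =====
def Claim_equal_choose_best_chunk_for_sentences : Prop := ∀ (sentence_ids : List String) (sentence_to_chunk_ids : List (String × List String)), Dom_choose_best_chunk_for_sentences sentence_ids sentence_to_chunk_ids → Spec_choose_best_chunk_for_sentences sentence_ids sentence_to_chunk_ids (choose_best_chunk_for_sentences sentence_ids sentence_to_chunk_ids)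

-- ===== LEMMAS AND PROOFS =====

-- ===== VERDICT (by name: the statement is the Claim_ definition above) =====
-- step function of B's linear scan
def pvScanStep (best : Option (String × Int)) (p : String × Int) : Option (String × Int) :=
  match best with
  | none => some p
  | some q => if p.2 > q.2 || (p.2 == q.2 && p.1 < q.1) then some p else some q

def pvBefore (p q : String × Int) : Bool :=
  decide ((fun x : String × Int => -x.2) p < (fun x : String × Int => -x.2) q) ||
    (!decide ((fun x : String × Int => -x.2) q < (fun x : String × Int => -x.2) p) &&
      decide ((fun x : String × Int => x.1) p < (fun x : String × Int => x.1) q))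

theorem pvScanStep_eq (best : Option (String × Int)) (p : String × Int) :
    pvScanStep best p = match best with
      | none => some p
      | some q => if pvBefore p q then some p else some q := by
  cases best with
  | none => rfl
  | some q =>
    simp only [pvScanStep, pvBefore]
    congr 1
    by_cases h1 : p.2 > q.2 <;> by_cases h2 : p.2 = q.2 <;>
      simp [h1, h2] ; omega

theorem head?_insertBy (p : String × Int) (acc : List (String × Int)) :
    (PySem.List.insertBy pvBefore p acc).head? = pvScanStep acc.head? p := by
  rw [pvScanStep_eq]
  cases acc with
  | nil => rfl
  | cons y ys =>
    simp only [PySem.List.insertBy, List.head?]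
    by_cases h : pvBefore p y <;> simp [h]

theorem head?_foldl_insertBy (l acc : List (String × Int)) :
    (l.foldl (fun a x => PySem.List.insertBy pvBefore x a) acc).head? =
      l.foldl pvScanStep acc.head? := by
  induction l generalizing acc with
  | nil => rfl
  | cons x t ih => simp only [List.foldl_cons, ih, head?_insertBy]

theorem votes_eq (sentence_ids : List String) (sentence_to_chunk_ids : List (String × List String)) :
    sentence_ids.foldl (fun d sent_id =>
        ((PySem.Dict.ofList sentence_to_chunk_ids).getD sent_id []).foldl
          (fun d chunk_id => d.insert chunk_id (d.getD chunk_id 0 + 1)) d)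
      (PySem.Dict.empty : PySem.Dict String Int) =
    (sentence_ids.flatMap (fun s => (PySem.Dict.ofList sentence_to_chunk_ids).getD s [])).foldl
      (fun d c => d.insert c (d.getD c 0 + 1)) (PySem.Dict.empty : PySem.Dict String Int) := by
  rw [List.foldl_flatMap]

-- ===== VERDICT (by name: the statement is the Claim_ definition above) =====
theorem choose_best_chunk_for_sentences_spec : Claim_equal_choose_best_chunk_for_sentences := by
  intro sentence_ids sentence_to_chunk_ids _
  unfold Spec_choose_best_chunk_for_sentences
  unfold choose_best_chunk_for_sentences choose_best_chunk_for_sentences_alt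
  simp only [← votes_eq]
  set votes := sentence_ids.foldl (fun d sent_id =>
      ((PySem.Dict.ofList sentence_to_chunk_ids).getD sent_id []).foldl
        (fun d chunk_id => d.insert chunk_id (d.getD chunk_id 0 + 1)) d)
    (PySem.Dict.empty : PySem.Dict String Int) with hv
  have hscan : votes.items.foldl (fun best p =>
      match best with
      | none => some p
      | some q => if p.2 > q.2 || (p.2 == q.2 && p.1 < q.1) then some p else some q) none =
      (PySem.List.sorted2 votes.items (fun x => -x.2) (fun x => x.1)).head? := by
    rw [show PySem.List.sorted2 votes.items (fun x : String × Int => -x.2) (fun x => x.1) =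
        votes.items.foldl (fun a x => PySem.List.insertBy pvBefore x a) [] from rfl]
    rw [head?_foldl_insertBy]
    rfl
  by_cases h : votes.items = []
  · simp [h]
  · simp only [if_neg h, hscan]
    have hlen : (PySem.List.sorted2 votes.items (fun x : String × Int => -x.2) (fun x => x.1)).length
        = votes.items.length := (PySem.List.sorted2_perm _ _ _ _).length_eq
    cases hs : PySem.List.sorted2 votes.items (fun x : String × Int => -x.2) (fun x => x.1) with
    | nil =>
      exfalso; apply h
      have := hlen; rw [hs] at this; exact List.length_eq_zero_iff.mp this.symm
    | cons m t => simp [PySem.List.pyGetD_zero]
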